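-- pv_equiv track=rewrite | github.com/BobMcDear/programming-challenges | Codeforces/Angry Students.py | chert
-- ===== SOURCE A (Python) =====
-- def chert(s):
--     new = [s[0]]
--     for i in range(1, len(s)):
--         if s[i-1]=='A':
--             new.append('A')
--         else:
--             new.append(s[i])
--     return list(new)
-- ===== SOURCE B (Python) =====
-- def chert(s):
--     mask = 0
--     for i, c in enumerate(s):
--         if c == 'A':
--             mask |= 1 << i
--     mask |= mask << 1
--     return ['A' if (mask >> i) & 1 else c for i, c in enumerate(s)]
-- ===== Notes on version B (the rewrite author's own statement) =====
-- stated objective: alternative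
-- what changed: B encodes the positions of 'A' elements as an integer bitmask in one pass, propagates them forward with a single arithmetic shift-or (mask |= mask << 1), and then reads each output element off the mask bits, instead of A's per-position predecessor test while appending to a list.
-- crash fix: On the empty list A raises IndexError (it reads s[0]); B naturally returns []. — e.g. on chert([]): A raises IndexError, B returns []
import Mathlib
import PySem

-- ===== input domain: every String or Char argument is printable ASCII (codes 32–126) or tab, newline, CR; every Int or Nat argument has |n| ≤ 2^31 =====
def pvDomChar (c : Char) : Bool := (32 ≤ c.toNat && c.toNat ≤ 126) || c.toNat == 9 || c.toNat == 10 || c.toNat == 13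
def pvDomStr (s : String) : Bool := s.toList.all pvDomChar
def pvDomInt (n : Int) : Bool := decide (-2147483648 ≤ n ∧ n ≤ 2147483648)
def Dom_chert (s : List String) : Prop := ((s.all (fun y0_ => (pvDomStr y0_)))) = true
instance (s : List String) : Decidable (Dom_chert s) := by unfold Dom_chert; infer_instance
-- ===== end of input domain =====

-- B replaces A's per-position predecessor test with an integer bitmask of the 'A'
-- positions propagated forward by one arithmetic shift-or; return values proved equal
-- on nonempty lists (A raises IndexError on []).

-- ===== PORT A =====
def chert (s : List String) : List String :=
  let new : List String := [PySem.List.pyGetD s 0 ""]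
  (PySem.List.pyRange 1 s.length 1).foldl
    (fun new i =>
      if PySem.List.pyGetD s (i - 1) "" = "A" then new ++ ["A"]
      else new ++ [PySem.List.pyGetD s i ""]) new

-- ===== PORT B =====
-- mask values are nonnegative Python ints throughout, so Nat is exact here
def chert_alt (s : List String) : List String :=
  let mask : Nat := (PySem.List.enumerate s 0).foldl
    (fun mask ic => if ic.2 = "A" then mask ||| ((1 : Nat) <<< ic.1.toNat) else mask) 0
  let mask2 : Nat := mask ||| (mask <<< 1)
  (PySem.List.enumerate s 0).map
    (fun ic => if (mask2 >>> ic.1.toNat) &&& 1 ≠ 0 then "A" else ic.2)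

-- ===== PRECONDITION & SPEC =====
-- Pre_ excludes only the empty list, on which A raises IndexError (s[0]).
def Pre_chert (s : List String) : Prop := s ≠ []
instance (s : List String) : Decidable (Pre_chert s) := by unfold Pre_chert; infer_instance
def pvWitness_chert : List String := (["A", "B"])

-- On the empty list A raises IndexError (it reads s[0]); B naturally returns [].
def Raises_chert (s : List String) : Prop := s = []
instance (s : List String) : Decidable (Raises_chert s) := by unfold Raises_chert; infer_instance
def pvRaiseWitness_chert : List String := ([])
def pvRaiseWitnessOut_chert : List String := []

def Spec_chert (s : List String) (out : List String) : Prop := out = chert_alt s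
instance (s : List String) (out : List String) : Decidable (Spec_chert s out) := by unfold Spec_chert; infer_instance

-- ===== CLAIM (what is proved, stated in full; the proofs are below) =====
def Claim_equal_chert : Prop := ∀ (s : List String), Dom_chert s → Pre_chert s → Spec_chert s (chert s)
def Claim_raises_chert : Prop := (∀ (s : List String), Dom_chert s → Raises_chert s → ¬ Pre_chert s) ∧ (Dom_chert (pvRaiseWitness_chert) ∧ Raises_chert (pvRaiseWitness_chert) ∧ chert_alt (pvRaiseWitness_chert) = pvRaiseWitnessOut_chert)

-- ===== LEMMAS AND PROOFS =====

-- the value both programs compute at position j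
def pvTarget (s : List String) (j : Nat) : String :=
  if 1 ≤ j ∧ s.getD (j - 1) "" = "A" then "A" else s.getD j ""

-- A's loop body is "append a singleton": its fold is a cons-map
lemma chertA_eq_map (s : List String) :
    chert s = PySem.List.pyGetD s 0 "" ::
      (PySem.List.pyRange 1 s.length 1).map
        (fun i => if PySem.List.pyGetD s (i - 1) "" = "A" then "A"
                  else PySem.List.pyGetD s i "") := by
  show (PySem.List.pyRange 1 (s.length : Int) 1).foldl
      (fun new i =>
        if PySem.List.pyGetD s (i - 1) "" = "A" then new ++ ["A"]
        else new ++ [PySem.List.pyGetD s i ""]) [PySem.List.pyGetD s 0 ""] = _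
  rw [show (fun (new : List String) (i : Int) =>
        if PySem.List.pyGetD s (i - 1) "" = "A" then new ++ ["A"]
        else new ++ [PySem.List.pyGetD s i ""]) =
      (fun new i => new ++ [if PySem.List.pyGetD s (i - 1) "" = "A" then "A"
        else PySem.List.pyGetD s i ""]) from
    funext fun new => funext fun i => by split <;> rfl]
  rw [PySem.List.foldl_append_singleton_eq_map]
  rfl

lemma chertA_length (s : List String) (hs : s ≠ []) : (chert s).length = s.length := by
  rw [chertA_eq_map]
  simp [PySem.List.length_pyRange_one]
  have : 1 ≤ s.length := List.length_pos_iff.mpr hs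
  omega

lemma chertA_get? (s : List String) (j : Nat) (hj : j < s.length) :
    (chert s)[j]? = some (pvTarget s j) := by
  rw [chertA_eq_map]
  unfold pvTarget
  cases j with
  | zero =>
      simp [PySem.List.pyGetD_zero]
  | succ m =>
      rw [List.getElem?_cons_succ, List.getElem?_map,
        PySem.List.getElem?_pyRange_one]
      rw [if_pos (by omega)]
      simp only [Option.map_some]
      congr 1
      have h1 : (1 : Int) + (m : Nat) - 1 = ((m : Nat) : Int) := by omega
      have h2 : (1 : Int) + (m : Nat) = ((m + 1 : Nat) : Int) := by push_cast; omega
      rw [h1, h2]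
      simp only [PySem.List.pyGetD_natCast]
      have h3 : (1 ≤ m + 1 ∧ s.getD (m + 1 - 1) "" = "A") ↔ s.getD m "" = "A" := by
        constructor
        · rintro ⟨_, h⟩; simpa using h
        · intro h; exact ⟨by omega, by simpa using h⟩
      exact (if_congr h3 rfl rfl).symm

-- bit j of B's mask after folding (enumerate s k): original bit of init, or an "A" of s there
lemma maskFold_testBit (s : List String) (k : Nat) (init : Nat) (j : Nat) :
    (((PySem.List.enumerate s (k : Int)).foldl
        (fun mask ic => if ic.2 = "A" then mask ||| ((1 : Nat) <<< ic.1.toNat) else mask)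
        init).testBit j) =
      (init.testBit j ||
        (decide (k ≤ j) && decide (j < k + s.length) && decide (s.getD (j - k) "" = "A"))) := by
  induction s generalizing k init with
  | nil => simp [PySem.List.enumerate_nil]
  | cons x xs ih =>
      rw [PySem.List.enumerate_cons, List.foldl_cons]
      have hk1 : ((k : Int) + 1) = ((k + 1 : Nat) : Int) := by push_cast; ring
      have hinit : ((if x = "A" then init ||| ((1 : Nat) <<< ((k : Int)).toNat) else init).testBit j)
          = (init.testBit j || (decide (x = "A") && decide (j = k))) := by
        by_cases hx : x = "A"
        · rw [if_pos hx]
          rw [Nat.testBit_or]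
          have : ((1 : Nat) <<< ((k : Int)).toNat).testBit j = decide (j = k) := by
            rw [show ((k : Int)).toNat = k from by simp, Nat.shiftLeft_eq, one_mul,
              Nat.testBit_two_pow]
            by_cases h : j = k <;> simp [h, eq_comm]
          rw [this]; simp [hx]
        · rw [if_neg hx]; simp [hx]
      rw [hk1, ih, hinit]
      by_cases hjk : j = k
      · subst hjk
        simp [show ¬(j + 1 ≤ j) from by omega, show j < j + (xs.length + 1) from by omega]
      · rw [List.length_cons]
        by_cases h1 : k ≤ j
        · have h2 : k + 1 ≤ j := by omega
          have hget : (x :: xs).getD (j - k) "" = xs.getD (j - (k + 1)) "" := by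
            have : j - k = (j - (k + 1)) + 1 := by omega
            rw [this]; simp [List.getD]
          rw [hget]
          simp only [show decide (k ≤ j) = true from by simp [h1],
            show decide (k + 1 ≤ j) = true from by simp [h2],
            show decide (j = k) = false from by simp [hjk],
            show k + 1 + xs.length = k + (xs.length + 1) from by omega,
            Bool.and_false, Bool.or_false, Bool.true_and]
        · simp [show ¬(k ≤ j) from h1, show ¬(k + 1 ≤ j) from by omega, hjk]

lemma chertB_length (s : List String) : (chert_alt s).length = s.length := by
  unfold chert_alt
  simp [PySem.List.length_enumerate]

lemma chertB_get? (s : List String) (j : Nat) (hj : j < s.length) :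
    (chert_alt s)[j]? = some (pvTarget s j) := by
  unfold chert_alt
  rw [List.getElem?_map, PySem.List.getElem?_enumerate,
    List.getElem?_eq_getElem hj]
  simp only [Option.map_some]
  congr 1
  have htn : ((0 : Int) + (j : Nat)).toNat = j := by simp
  rw [htn]
  have hmask := fun (j' : Nat) => maskFold_testBit s 0 0 j'
  simp only [Nat.cast_zero, Nat.zero_testBit, Nat.zero_le, decide_true, Nat.zero_add,
    Nat.sub_zero, Bool.false_or, Bool.true_and] at hmask
  set mask : Nat := (PySem.List.enumerate s (0 : Int)).foldl
    (fun mask ic => if ic.2 = "A" then mask ||| ((1 : Nat) <<< ic.1.toNat) else mask) 0 with hm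
  have hcond : ((mask ||| (mask <<< 1)) >>> j) &&& 1 ≠ 0 ↔
      (mask ||| (mask <<< 1)).testBit j := by
    rw [Nat.testBit, Nat.and_comm]
    simp
  have hbit2 : (mask ||| (mask <<< 1)).testBit j =
      ((decide (j < s.length) && decide (s.getD j "" = "A")) ||
       (decide (1 ≤ j) && (decide (j - 1 < s.length) && decide (s.getD (j - 1) "" = "A")))) := by
    rw [Nat.testBit_or, Nat.testBit_shiftLeft, hmask j, hmask (j - 1)]
  have hfin : (((mask ||| (mask <<< 1)) >>> j) &&& 1 ≠ 0) ↔
      (s.getD j "" = "A" ∨ (1 ≤ j ∧ s.getD (j - 1) "" = "A")) := by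
    rw [hcond, hbit2]
    constructor
    · intro h
      simp at h
      rcases h with ⟨_, h⟩ | ⟨h1, _, h3⟩
      · exact Or.inl (by simpa using h)
      · exact Or.inr ⟨h1, by simpa using h3⟩
    · intro h
      simp
      rcases h with h | ⟨h1, h3⟩
      · exact Or.inl ⟨hj, by simpa using h⟩
      · exact Or.inr ⟨h1, by omega, by simpa using h3⟩
  unfold pvTarget
  by_cases hpred : 1 ≤ j ∧ s.getD (j - 1) "" = "A"
  · rw [if_pos hpred, if_pos (hfin.mpr (Or.inr hpred))]
  · rw [if_neg hpred]
    by_cases hcur : s.getD j "" = "A"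
    · rw [if_pos (hfin.mpr (Or.inl hcur)), hcur]
    · rw [if_neg (fun h => (hfin.mp h).elim hcur hpred)]
      exact (List.getD_eq_getElem s "" hj).symm

-- ===== VERDICT (by name: the statement is the Claim_ definition above) =====
theorem chert_spec : Claim_equal_chert := by
  intro s _ hpre
  unfold Spec_chert
  apply List.ext_getElem?
  intro j
  by_cases hj : j < s.length
  · rw [chertA_get? s j hj, chertB_get? s j hj]
  · rw [List.getElem?_eq_none (by rw [chertA_length s hpre]; omega),
      List.getElem?_eq_none (by rw [chertB_length]; omega)]

@[simp] theorem chert_raises : Claim_raises_chert := by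
  unfold Claim_raises_chert
  exact ⟨fun s _ hr hp => hp hr, by decide⟩
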